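-- pv_equiv track=rewrite | github.com/xrigueira/w-VP | mr_windower.py | windower
-- ===== SOURCE A (Python) =====
-- def windower(data, window_size, stride, num_variables):
--
--     windows = []
--     if window_size > 1:
--         for i in data:
--             num_windows = (len(i) - window_size * num_variables) // (stride * num_variables) + 1
--             for j in range(0, num_windows, stride):
--                 window = i[j * num_variables: (j * num_variables) + (window_size * num_variables)]
--                 windows.append(window)
--         window_size = window_size // 2
--         return [windows] + windower(data, window_size, stride, num_variables)
--     else:
--         return []
-- ===== SOURCE B (Python) =====
-- def windower(data, window_size, stride, num_variables):
--     result = []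
--     ws = window_size
--     while ws > 1:
--         scale = []
--         for row in data:
--             num_windows = (len(row) - ws * num_variables) // (stride * num_variables) + 1
--             for j in range(0, num_windows, stride):
--                 scale.append(row[j * num_variables: j * num_variables + ws * num_variables])
--         result.append(scale)
--         ws //= 2
--     return result
-- ===== Notes on version B (the rewrite author's own statement) =====
-- stated objective: simpler
-- what changed: Replaces A's recursion (each level prepends its scale list and recurses on the halved window size) with a single iterative while-loop over a local window size that appends each scale list to an accumulator.
import Mathlib
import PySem

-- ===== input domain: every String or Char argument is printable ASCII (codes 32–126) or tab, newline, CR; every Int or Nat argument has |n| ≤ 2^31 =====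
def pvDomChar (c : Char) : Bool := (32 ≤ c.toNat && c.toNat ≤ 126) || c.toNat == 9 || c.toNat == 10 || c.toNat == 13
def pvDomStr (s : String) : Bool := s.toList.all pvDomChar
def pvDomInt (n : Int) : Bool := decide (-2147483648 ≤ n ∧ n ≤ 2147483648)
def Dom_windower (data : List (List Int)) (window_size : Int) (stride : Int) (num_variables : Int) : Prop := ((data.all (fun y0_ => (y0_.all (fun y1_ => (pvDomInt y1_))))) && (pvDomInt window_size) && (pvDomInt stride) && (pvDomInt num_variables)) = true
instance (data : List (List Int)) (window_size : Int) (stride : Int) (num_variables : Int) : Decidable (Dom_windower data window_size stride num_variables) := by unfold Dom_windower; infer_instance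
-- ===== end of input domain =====

-- B replaces A's recursion on the halved window size by an iterative accumulator loop (simpler decomposition, same cost).


-- ===== PORT A =====
-- the inner double loop of A: for i in data: … for j in range(0, num_windows, stride): windows.append(…)
def windowerScaleA (data : List (List Int)) (window_size : Int) (stride : Int) (num_variables : Int) : List (List Int) :=
  data.foldl (fun windows i =>
    let num_windows : Int := PySem.Int.floordiv ((i.length : Int) - window_size * num_variables) (stride * num_variables) + 1
    (PySem.List.pyRange 0 num_windows stride).foldl (fun w j =>
      w ++ [PySem.List.slice i (some (j * num_variables)) (some (j * num_variables + window_size * num_variables))]) windows) []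

def windower (data : List (List Int)) (window_size : Int) (stride : Int) (num_variables : Int) : List (List (List Int)) :=
  if window_size > 1 then
    windowerScaleA data window_size stride num_variables ::
      windower data (PySem.Int.floordiv window_size 2) stride num_variables
  else []
termination_by window_size.toNat
decreasing_by
  rw [PySem.Int.floordiv_eq_ediv_of_pos (by omega)]
  omega

-- ===== PORT B =====
-- the inner double loop of B (identical scale construction at one window size)
def windowerScaleB (data : List (List Int)) (ws : Int) (stride : Int) (num_variables : Int) : List (List Int) :=
  data.foldl (fun scale row =>
    let num_windows : Int := PySem.Int.floordiv ((row.length : Int) - ws * num_variables) (stride * num_variables) + 1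
    (PySem.List.pyRange 0 num_windows stride).foldl (fun sc j =>
      sc ++ [PySem.List.slice row (some (j * num_variables)) (some (j * num_variables + ws * num_variables))]) scale) []

-- the while-loop of B: result is the accumulator, ws halves each iteration
def windowerLoopB (data : List (List Int)) (ws : Int) (stride : Int) (num_variables : Int) (result : List (List (List Int))) : List (List (List Int)) :=
  if ws > 1 then
    windowerLoopB data (PySem.Int.floordiv ws 2) stride num_variables
      (result ++ [windowerScaleB data ws stride num_variables])
  else result
termination_by ws.toNat
decreasing_by
  rw [PySem.Int.floordiv_eq_ediv_of_pos (by omega)]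
  omega

def windower_alt (data : List (List Int)) (window_size : Int) (stride : Int) (num_variables : Int) : List (List (List Int)) :=
  windowerLoopB data window_size stride num_variables []

-- ===== PRECONDITION & SPEC =====
-- Pre_ excludes exactly the inputs where Python A raises: with window_size > 1 and a nonempty data
-- list it divides by stride*num_variables (ZeroDivisionError if 0) and calls range with step stride (ValueError if 0).
def Pre_windower (data : List (List Int)) (window_size : Int) (stride : Int) (num_variables : Int) : Prop :=
  window_size ≤ 1 ∨ data = [] ∨ (stride ≠ 0 ∧ num_variables ≠ 0)
instance (data : List (List Int)) (window_size : Int) (stride : Int) (num_variables : Int) : Decidable (Pre_windower data window_size stride num_variables) := by unfold Pre_windower; infer_instance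
def pvWitness_windower : List (List Int) × Int × Int × Int := ([[1, 2, 3, 4]], 2, 1, 1)

def Spec_windower (data : List (List Int)) (window_size : Int) (stride : Int) (num_variables : Int) (out : List (List (List Int))) : Prop := out = windower_alt data window_size stride num_variables
instance (data : List (List Int)) (window_size : Int) (stride : Int) (num_variables : Int) (out : List (List (List Int))) : Decidable (Spec_windower data window_size stride num_variables out) := by unfold Spec_windower; infer_instance

-- ===== CLAIM (what is proved, stated in full; the proofs are below) =====
def Claim_equal_windower : Prop := ∀ (data : List (List Int)) (window_size : Int) (stride : Int) (num_variables : Int), Dom_windower data window_size stride num_variables → Pre_windower data window_size stride num_variables → Spec_windower data window_size stride num_variables (windower data window_size stride num_variables)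

-- ===== LEMMAS AND PROOFS =====

-- the two scale helpers have identical bodies
theorem scaleB_eq_scaleA (data : List (List Int)) (ws s nv : Int) :
    windowerScaleB data ws s nv = windowerScaleA data ws s nv := rfl

-- loop invariant: the accumulator version computes acc ++ the recursive version
theorem loopB_eq (data : List (List Int)) (s nv : Int) :
    ∀ (ws : Int) (acc : List (List (List Int))),
      windowerLoopB data ws s nv acc = acc ++ windower data ws s nv := by
  intro ws acc
  induction hn : ws.toNat using Nat.strong_induction_on generalizing ws acc with
  | _ n ih =>
    by_cases h : ws > 1
    · rw [windowerLoopB, windower, if_pos h, if_pos h,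
        ih ((PySem.Int.floordiv ws 2).toNat)
          (by rw [PySem.Int.floordiv_eq_ediv_of_pos (by omega)]; omega)
          _ _ rfl, scaleB_eq_scaleA]
      simp
    · rw [windowerLoopB, windower, if_neg h, if_neg h]
      simp

-- ===== VERDICT (by name: the statement is the Claim_ definition above) =====
theorem windower_spec : Claim_equal_windower := by
  intro data ws s nv _ _
  unfold Spec_windower windower_alt
  rw [loopB_eq]
  simp
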